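-- pv_equiv track=rewrite | github.com/StBinge/leetcode | LCP 51.烹饪料理.py | perfectMenu
-- ===== SOURCE A (Python) =====
-- from typing import List
--
-- def perfectMenu(materials: List[int], cookbooks: List[List[int]], attribute: List[List[int]], limit: int) -> int:
--     if sum(y for _,y in attribute)<limit:
--          return -1
--     NC=len(cookbooks)
--     NM=len(materials)
--     ret=-1
--     for i in range(1,1<<NC):
--         eat=de=0
--         valid=True
--         mat=[0]*NM
--         for j in range(NC):
--             if (i>>j)&1==0:
--                 continue
--             d,e=attribute[j]
--             de+=d
--             eat+=e
--             for k,m in enumerate(cookbooks[j]):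
--                     mat[k]+=m
--                     if mat[k]>materials[k]:
--                         valid=False
--                         break
--             if not valid:
--                  break
--         if valid and eat>=limit:
--             ret=max(ret,de)
--     return ret
-- ===== SOURCE B (Python) =====
-- def perfectMenu(materials, cookbooks, attribute, limit):
--     if sum(e for _, e in attribute) < limit:
--         return -1
--     def dfs(items, remaining, eat, glory, chosen):
--         if not items:
--             return glory if chosen and eat >= limit else -1
--         (cb, (d, e)), rest = items[0], items[1:]
--         best = dfs(rest, remaining, eat, glory, chosen)
--         new = remaining[:]
--         ok = True
--         for k, m in enumerate(cb):
--             new[k] -= m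
--             if new[k] < 0:
--                 ok = False
--         if ok:
--             best = max(best, dfs(rest, new, eat + e, glory + d, True))
--         return best
--     return dfs(list(zip(cookbooks, attribute)), materials, 0, 0, False)
-- ===== Notes on version B (the rewrite author's own statement) =====
-- stated objective: alternative
-- what changed: Replaces the bitmask enumeration over range(1,1<<NC) with a recursive include/exclude DFS over the zipped (cookbook, attribute) list that carries the remaining materials, keeping A's early total-fullness feasibility check.
-- outside the precondition, e.g. on perfectMenu([0], [[1, 1]], [[1, 1]], 1): A returns -1, B raises IndexError
import Mathlib
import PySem

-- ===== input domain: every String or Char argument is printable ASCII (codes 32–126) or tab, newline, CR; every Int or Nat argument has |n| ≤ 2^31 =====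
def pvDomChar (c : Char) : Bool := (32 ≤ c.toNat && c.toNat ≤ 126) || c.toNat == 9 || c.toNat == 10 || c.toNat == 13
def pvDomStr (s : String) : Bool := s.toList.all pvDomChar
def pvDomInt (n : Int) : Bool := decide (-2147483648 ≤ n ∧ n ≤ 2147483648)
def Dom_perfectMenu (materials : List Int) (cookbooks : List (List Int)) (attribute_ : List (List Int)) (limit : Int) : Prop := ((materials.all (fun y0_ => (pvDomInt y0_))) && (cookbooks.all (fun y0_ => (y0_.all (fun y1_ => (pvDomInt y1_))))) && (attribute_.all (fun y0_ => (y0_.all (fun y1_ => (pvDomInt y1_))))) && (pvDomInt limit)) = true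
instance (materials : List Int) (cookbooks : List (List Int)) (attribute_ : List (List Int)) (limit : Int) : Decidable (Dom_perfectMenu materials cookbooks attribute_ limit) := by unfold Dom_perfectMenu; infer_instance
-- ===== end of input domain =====

-- B replaces A's bitmask subset loop by a pruning include/exclude DFS over the zipped
-- (cookbook, attribute) list carrying the remaining materials (alternative decomposition;
-- it keeps A's early total-fullness feasibility check).


-- ===== PORT A =====
-- `for k,m in enumerate(cookbooks[j]): mat[k]+=m; if mat[k]>materials[k]: valid=False; break`
-- (the enumerate loop as structural recursion on the row, carrying the index k; break = return)
def pmRowGo (materials : List Int) : List Int → Nat → List Int → List Int × Bool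
  | [], _, mat => (mat, true)
  | m :: ms, k, mat =>
      let mat' := mat.set k (mat.getD k 0 + m)
      if mat'.getD k 0 > materials.getD k 0 then (mat', false)
      else pmRowGo materials ms (k + 1) mat'

-- `for j in range(NC): if (i>>j)&1==0: continue; d,e=attribute[j]; de+=d; eat+=e; <row loop>;
--  if not valid: break` — index j becomes the list position (cookbooks consumed structurally,
-- attribute_ via drop), bit j of i becomes bit 0 of the successively shifted mask; since the
-- loop breaks as soon as valid is False, valid is carried only in the result.
-- State (eat, de, mat); `d,e=attribute[j]` is exact for rows of length 2 (ensured by Pre_).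
def pmMaskGo (materials : List Int) : List (List Int) → List (List Int) → Nat →
    Int × Int × List Int → Int × Int × Bool × List Int
  | [], _, _, s => (s.1, s.2.1, true, s.2.2)
  | cb :: cbs, atts, i, (eat, de, mat) =>
      if i &&& 1 == 0 then pmMaskGo materials cbs (atts.drop 1) (i >>> 1) (eat, de, mat)
      else
        let a := atts.getD 0 []
        let d := a.getD 0 0
        let e := a.getD 1 0
        let r := pmRowGo materials cb 0 mat
        if r.2 then pmMaskGo materials cbs (atts.drop 1) (i >>> 1) (eat + e, de + d, r.1)
        else (eat + e, de + d, false, r.1)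

-- `sum(y for _,y in attribute)` is ported as the sum of r.getD 1 0, exact for rows of length 2
-- (ensured by Pre_); `range(1, 1<<NC)` = (List.range (2^NC)).drop 1 (all masks are nonnegative).
def perfectMenu (materials : List Int) (cookbooks : List (List Int)) (attribute_ : List (List Int)) (limit : Int) : Int :=
  if (attribute_.map (fun r => r.getD 1 0)).sum < limit then -1
  else
    let NC := cookbooks.length
    let NM := materials.length
    ((List.range (2 ^ NC)).drop 1).foldl (fun ret i =>
      let s := pmMaskGo materials cookbooks attribute_ i (0, 0, List.replicate NM 0)
      if s.2.2.1 && decide (limit ≤ s.1) then max ret s.2.1 else ret) (-1)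

-- ===== PORT B =====
-- `new = remaining[:]; ok = True; for k,m in enumerate(cb): new[k] -= m; if new[k] < 0: ok = False`
def pmSubGo : List Int → Nat → List Int × Bool → List Int × Bool
  | [], _, s => s
  | m :: ms, k, (new, ok) =>
      let new' := new.set k (new.getD k 0 - m)
      pmSubGo ms (k + 1) (new', ok && decide (0 ≤ new'.getD k 0))

-- the include/exclude DFS of Source B over the zipped (cookbook, attribute) items;
-- `(d, e)` unpack is ported as getD 0/getD 1, exact for rows of length 2 (ensured by Pre_).
def pmDfs (limit : Int) : List (List Int × List Int) → List Int → Int → Int → Bool → Int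
  | [], _, eat, glory, chosen => if chosen && decide (limit ≤ eat) then glory else -1
  | (cb, a) :: rest, remaining, eat, glory, chosen =>
      let best := pmDfs limit rest remaining eat glory chosen
      let s := pmSubGo cb 0 (remaining, true)
      if s.2 then max best (pmDfs limit rest s.1 (eat + a.getD 1 0) (glory + a.getD 0 0) true)
      else best

def perfectMenu_alt (materials : List Int) (cookbooks : List (List Int)) (attribute_ : List (List Int)) (limit : Int) : Int :=
  if (attribute_.map (fun r => r.getD 1 0)).sum < limit then -1
  else pmDfs limit (cookbooks.zip attribute_) materials 0 0 false

-- ===== PRECONDITION & SPEC =====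
-- Pre_ excludes only shape-mismatched inputs: an attribute row not of length 2 (A's generator
-- unpacking raises ValueError before anything else) and, when the early total-fullness check
-- passes, attribute shorter than cookbooks or a cookbook row longer than materials — on these A
-- raises IndexError, except that an over-long cookbook row that overruns materials only past an
-- early over-budget break lets A return -1 while B's subtraction loop raises IndexError there.
def Pre_perfectMenu (materials : List Int) (cookbooks : List (List Int)) (attribute_ : List (List Int)) (limit : Int) : Prop :=
  (∀ r ∈ attribute_, r.length = 2) ∧
  (limit ≤ (attribute_.map (fun r => r.getD 1 0)).sum →
    cookbooks.length ≤ attribute_.length ∧ ∀ r ∈ cookbooks, r.length ≤ materials.length)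
instance (materials : List Int) (cookbooks : List (List Int)) (attribute_ : List (List Int)) (limit : Int) : Decidable (Pre_perfectMenu materials cookbooks attribute_ limit) := by unfold Pre_perfectMenu; infer_instance

def pvWitness_perfectMenu : List Int × List (List Int) × List (List Int) × Int := ([3], [[2]], [[5, 5]], 1)

def Spec_perfectMenu (materials : List Int) (cookbooks : List (List Int)) (attribute_ : List (List Int)) (limit : Int) (out : Int) : Prop := out = perfectMenu_alt materials cookbooks attribute_ limit
instance (materials : List Int) (cookbooks : List (List Int)) (attribute_ : List (List Int)) (limit : Int) (out : Int) : Decidable (Spec_perfectMenu materials cookbooks attribute_ limit out) := by unfold Spec_perfectMenu; infer_instance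

-- ===== CLAIM (what is proved, stated in full; the proofs are below) =====
def Claim_equal_perfectMenu : Prop := ∀ (materials : List Int) (cookbooks : List (List Int)) (attribute_ : List (List Int)) (limit : Int), Dom_perfectMenu materials cookbooks attribute_ limit → Pre_perfectMenu materials cookbooks attribute_ limit → Spec_perfectMenu materials cookbooks attribute_ limit (perfectMenu materials cookbooks attribute_ limit)

-- ===== LEMMAS AND PROOFS =====

-- invariant tying A's consumed materials `mat` to B's remaining materials
def PmInv (materials mat rem : List Int) : Prop :=
  mat.length = materials.length ∧ rem.length = materials.length ∧
  ∀ k, mat.getD k 0 + rem.getD k 0 = materials.getD k 0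

-- the value mask i contributes in A's outer loop (some de if valid and eat ≥ limit)
def pmVal (materials : List Int) (limit : Int) (cbs atts : List (List Int))
    (eat glory : Int) (mat : List Int) (i : Nat) : Option Int :=
  let s := pmMaskGo materials cbs atts i (eat, glory, mat)
  if s.2.2.1 && decide (limit ≤ s.1) then some s.2.1 else none

-- the mask list A folds over: all masks when the prefix already chose something, else drop mask 0
def pmMasks (chosen : Bool) (n : Nat) : List Nat :=
  if chosen then List.range (2 ^ n) else (List.range (2 ^ n)).drop 1

lemma pmSubGo_false (ms : List Int) (k : Nat) (new : List Int) :
    (pmSubGo ms k (new, false)).2 = false := by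
  induction ms generalizing k new with
  | nil => simp [pmSubGo]
  | cons m ms ih => simp [pmSubGo, ih]

lemma pm_getD_set_self (l : List Int) (k : Nat) (v : Int) (hk : k < l.length) :
    (l.set k v).getD k 0 = v := by
  simp [List.getD, hk]

lemma pm_getD_set_ne (l : List Int) (k j : Nat) (v : Int) (h : j ≠ k) :
    (l.set k v).getD j 0 = l.getD j 0 := by
  simp only [List.getD, List.getElem?_set]
  rw [if_neg (fun h' => h h'.symm)]

lemma pm_getD_replicate (n k : Nat) : (List.replicate n (0 : Int)).getD k 0 = 0 := by
  simp [List.getD, List.getElem?_replicate]; split <;> rfl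

lemma pm_range_cons_drop (m : Nat) (hm : 0 < m) : List.range m = 0 :: (List.range m).drop 1 := by
  cases m with
  | zero => omega
  | succ k => rw [List.range_succ_eq_map]; rfl

lemma pmRow_eq (materials : List Int) (row : List Int) (k : Nat) (mat rem : List Int)
    (hinv : PmInv materials mat rem) (hlen : row.length + k ≤ materials.length) :
    (pmRowGo materials row k mat).2 = (pmSubGo row k (rem, true)).2 ∧
    ((pmRowGo materials row k mat).2 = true →
      PmInv materials (pmRowGo materials row k mat).1 (pmSubGo row k (rem, true)).1) := by
  induction row generalizing k mat rem with
  | nil =>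
    refine ⟨by simp [pmRowGo, pmSubGo], fun _ => ?_⟩
    simpa [pmRowGo, pmSubGo] using hinv
  | cons m ms ih =>
    obtain ⟨hm, hr, hsum⟩ := hinv
    have hk : k < materials.length := by
      simp only [List.length_cons] at hlen; omega
    have hmg : (mat.set k (mat.getD k 0 + m)).getD k 0 = mat.getD k 0 + m :=
      pm_getD_set_self _ _ _ (by omega)
    have hng : (rem.set k (rem.getD k 0 - m)).getD k 0 = rem.getD k 0 - m :=
      pm_getD_set_self _ _ _ (by omega)
    have hinv' : PmInv materials (mat.set k (mat.getD k 0 + m)) (rem.set k (rem.getD k 0 - m)) := by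
      refine ⟨by simp [hm], by simp [hr], fun j => ?_⟩
      by_cases hj : j = k
      · subst hj; rw [hmg, hng]; have := hsum j; omega
      · rw [pm_getD_set_ne _ _ _ _ hj, pm_getD_set_ne _ _ _ _ hj]; exact hsum j
    by_cases hviol : materials.getD k 0 < mat.getD k 0 + m
    · have hA : pmRowGo materials (m :: ms) k mat = (mat.set k (mat.getD k 0 + m), false) := by
        simp only [pmRowGo, hmg]
        rw [if_pos (by omega)]
      have hB : pmSubGo (m :: ms) k (rem, true) =
          pmSubGo ms (k + 1) (rem.set k (rem.getD k 0 - m), false) := by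
        simp only [pmSubGo, hng]
        congr 1
        simp only [Prod.mk.injEq, true_and, Bool.true_and]
        have := hsum k
        simp only [decide_eq_false_iff_not]; omega
      refine ⟨?_, ?_⟩
      · rw [hA, hB, pmSubGo_false]
      · rw [hA]; intro h; simp at h
    · have hA : pmRowGo materials (m :: ms) k mat =
          pmRowGo materials ms (k + 1) (mat.set k (mat.getD k 0 + m)) := by
        simp only [pmRowGo, hmg]
        rw [if_neg (by omega)]
      have hB : pmSubGo (m :: ms) k (rem, true) =
          pmSubGo ms (k + 1) (rem.set k (rem.getD k 0 - m), true) := by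
        simp only [pmSubGo, hng]
        congr 1
        simp only [Prod.mk.injEq, true_and, Bool.true_and]
        have := hsum k
        simp only [decide_eq_true_eq]; omega
      rw [hA, hB]
      exact ih _ _ _ hinv' (by simp only [List.length_cons] at hlen ⊢; omega)

lemma pm_stepfold (materials : List Int) (cookbooks attribute_ : List (List Int)) (limit : Int)
    (l : List Nat) (ret : Int) :
    l.foldl (fun ret i =>
      let s := pmMaskGo materials cookbooks attribute_ i (0, 0, List.replicate materials.length 0)
      if s.2.2.1 && decide (limit ≤ s.1) then max ret s.2.1 else ret) ret
    = (l.filterMap (pmVal materials limit cookbooks attribute_ 0 0 (List.replicate materials.length 0))).foldl max ret := by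
  induction l generalizing ret with
  | nil => rfl
  | cons i l ih =>
    simp only [List.foldl_cons, List.filterMap_cons, pmVal]
    split
    · rw [ih]; rfl
    · rw [ih]; rfl

lemma range_double_perm (m : Nat) :
    List.Perm (List.range (2 * m)) (((List.range m).map (fun q => 2 * q)) ++ ((List.range m).map (fun q => 2 * q + 1))) := by
  induction m with
  | zero => simp
  | succ m ih =>
    have h : 2 * (m + 1) = 2 * m + 1 + 1 := by ring
    rw [h, List.range_succ, List.range_succ, List.range_succ]
    simp only [List.map_append, List.map_cons, List.map_nil]
    refine ((ih.append_right _).append_right _).trans ?_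
    simp only [List.append_assoc]
    refine List.Perm.append_left _ ?_
    simpa [List.append_assoc] using
      (List.perm_append_comm
        (l₁ := (List.range m).map (fun q => 2 * q + 1)) (l₂ := [2 * m])).append_right [2 * m + 1]

lemma pmMasks_split (b : Bool) (n : Nat) :
    List.Perm (pmMasks b (n + 1)) (((pmMasks b n).map (fun q => 2 * q)) ++ ((pmMasks true n).map (fun q => 2 * q + 1))) := by
  have hfull := range_double_perm (2 ^ n)
  have h2 : 2 * 2 ^ n = 2 ^ (n + 1) := by ring
  rw [h2] at hfull
  cases b with
  | true => simpa [pmMasks] using hfull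
  | false =>
    have he : (List.range (2 ^ n)).map (fun q => 2 * q)
        = 0 :: ((List.range (2 ^ n)).drop 1).map (fun q => 2 * q) := by
      conv_lhs => rw [pm_range_cons_drop (2 ^ n) (Nat.two_pow_pos n)]
      rfl
    have h0 : List.Perm (0 :: (List.range (2 ^ (n + 1))).drop 1)
        (0 :: (((List.range (2 ^ n)).drop 1).map (fun q => 2 * q)
          ++ (List.range (2 ^ n)).map (fun q => 2 * q + 1))) := by
      rw [← pm_range_cons_drop (2 ^ (n + 1)) (Nat.two_pow_pos (n + 1)), ← List.cons_append, ← he]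
      exact hfull
    have := h0.cons_inv
    simpa [pmMasks] using this

lemma foldl_max_perm {l l' : List Int} (h : List.Perm l l') : ∀ a : Int, l.foldl max a = l'.foldl max a := by
  induction h with
  | nil => intro a; rfl
  | cons x _ ih => intro a; simp only [List.foldl_cons]; exact ih _
  | swap x y l => intro a; simp only [List.foldl_cons]; congr 1; omega
  | trans _ _ ih1 ih2 => intro a; rw [ih1, ih2]

lemma pmVal_even (materials : List Int) (limit : Int) (cb : List Int) (cbs atts : List (List Int))
    (eat glory : Int) (mat : List Int) (q : Nat) :
    pmVal materials limit (cb :: cbs) atts eat glory mat (2 * q)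
    = pmVal materials limit cbs (atts.drop 1) eat glory mat q := by
  have h1 : (2 * q) &&& 1 = 0 := by rw [Nat.and_one_is_mod]; omega
  have h2 : (2 * q) >>> 1 = q := by rw [Nat.shiftRight_one]; omega
  simp [pmVal, pmMaskGo, h1, h2]

lemma pmVal_odd (materials : List Int) (limit : Int) (cb : List Int) (cbs atts : List (List Int))
    (eat glory : Int) (mat : List Int) (q : Nat) :
    pmVal materials limit (cb :: cbs) atts eat glory mat (2 * q + 1)
    = (let a := atts.getD 0 []
       let r := pmRowGo materials cb 0 mat
       if r.2 then pmVal materials limit cbs (atts.drop 1) (eat + a.getD 1 0) (glory + a.getD 0 0) r.1 q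
       else none) := by
  have h1 : ¬ ((2 * q + 1) &&& 1 = 0) := by rw [Nat.and_one_is_mod]; omega
  have h2 : (2 * q + 1) >>> 1 = q := by rw [Nat.shiftRight_one]; omega
  by_cases hr : (pmRowGo materials cb 0 mat).2
  · simp [pmVal, pmMaskGo, h2, hr]
  · simp only [Bool.not_eq_true] at hr
    simp [pmVal, pmMaskGo, hr]

lemma pm_main (materials : List Int) (limit : Int) :
    ∀ (cbs atts : List (List Int)) (mat rem : List Int) (eat glory ret : Int) (chosen : Bool),
    PmInv materials mat rem → (∀ r ∈ cbs, r.length ≤ materials.length) →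
    cbs.length ≤ atts.length → -1 ≤ ret →
    ((pmMasks chosen cbs.length).filterMap (pmVal materials limit cbs atts eat glory mat)).foldl max ret
      = max ret (pmDfs limit (cbs.zip atts) rem eat glory chosen) := by
  intro cbs
  induction cbs with
  | nil =>
    intro atts mat rem eat glory ret chosen hinv hfit hlen hret
    cases chosen with
    | true =>
      by_cases hle : limit ≤ eat
      · simp [pmMasks, pmVal, pmMaskGo, pmDfs, hle, List.range_one]
      · simp [pmMasks, pmVal, pmMaskGo, pmDfs, hle, List.range_one]; omega
    | false => simp [pmMasks, pmVal, pmDfs, List.range_one]; omega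
  | cons cb cbs ih =>
    intro atts mat rem eat glory ret chosen hinv hfit hlen hret
    cases atts with
    | nil => simp at hlen
    | cons a as =>
      have hperm := (pmMasks_split chosen cbs.length).filterMap
        (pmVal materials limit (cb :: cbs) (a :: as) eat glory mat)
      rw [show (cb :: cbs).length = cbs.length + 1 from rfl,
          foldl_max_perm hperm ret, List.filterMap_append, List.foldl_append,
          List.filterMap_map, List.filterMap_map]
      have hE : (pmMasks chosen cbs.length).filterMap
          ((pmVal materials limit (cb :: cbs) (a :: as) eat glory mat) ∘ (fun q => 2 * q))
          = (pmMasks chosen cbs.length).filterMap (pmVal materials limit cbs as eat glory mat) :=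
        List.filterMap_congr (fun q _ => pmVal_even materials limit cb cbs (a :: as) eat glory mat q)
      have hfit' : ∀ r ∈ cbs, r.length ≤ materials.length :=
        fun r hr => hfit r (List.mem_cons_of_mem _ hr)
      have hlen' : cbs.length ≤ as.length := by simpa using hlen
      have hrow := pmRow_eq materials cb 0 mat rem hinv
        (by simpa using hfit cb List.mem_cons_self)
      rw [hE, ih as mat rem eat glory ret chosen hinv hfit' hlen' hret]
      by_cases hr2 : (pmRowGo materials cb 0 mat).2 = true
      · have hO : (pmMasks true cbs.length).filterMap
            ((pmVal materials limit (cb :: cbs) (a :: as) eat glory mat) ∘ (fun q => 2 * q + 1))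
            = (pmMasks true cbs.length).filterMap
                (pmVal materials limit cbs as (eat + a.getD 1 0) (glory + a.getD 0 0)
                  (pmRowGo materials cb 0 mat).1) := by
          refine List.filterMap_congr (fun q _ => ?_)
          have := pmVal_odd materials limit cb cbs (a :: as) eat glory mat q
          simpa [hr2] using this
        have hs2 : (pmSubGo cb 0 (rem, true)).2 = true := by rw [← hrow.1]; exact hr2
        have hinv' := hrow.2 hr2
        rw [hO, ih as (pmRowGo materials cb 0 mat).1 (pmSubGo cb 0 (rem, true)).1
              (eat + a.getD 1 0) (glory + a.getD 0 0) _ true hinv' hfit' hlen'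
              (le_trans hret (le_max_left _ _))]
        simp only [List.zip_cons_cons, pmDfs, hs2, if_true]
        omega
      · have hO : (pmMasks true cbs.length).filterMap
            ((pmVal materials limit (cb :: cbs) (a :: as) eat glory mat) ∘ (fun q => 2 * q + 1))
            = [] := by
          rw [List.filterMap_eq_nil_iff]
          intro q _
          have := pmVal_odd materials limit cb cbs (a :: as) eat glory mat q
          simpa [hr2] using this
        have hs2 : (pmSubGo cb 0 (rem, true)).2 = false := by
          rw [← hrow.1]; simpa using hr2
        rw [hO]
        simp only [List.foldl_nil, List.zip_cons_cons, pmDfs, hs2]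
        simp

lemma pmDfs_ge_false (limit : Int) (items : List (List Int × List Int)) :
    ∀ (rem : List Int) (eat glory : Int), (-1 : Int) ≤ pmDfs limit items rem eat glory false := by
  induction items with
  | nil => intro rem eat glory; simp [pmDfs]
  | cons z rest ih =>
    intro rem eat glory
    obtain ⟨cb, a⟩ := z
    simp only [pmDfs]
    have := ih rem eat glory
    split
    · exact le_trans this (le_max_left _ _)
    · exact this

-- ===== VERDICT (by name: the statement is the Claim_ definition above) =====
theorem perfectMenu_spec : Claim_equal_perfectMenu := by
  intro materials cookbooks attribute_ limit _ hpre
  obtain ⟨hrows, hshape⟩ := hpre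
  unfold Spec_perfectMenu perfectMenu perfectMenu_alt
  by_cases hsum : (attribute_.map (fun r => r.getD 1 0)).sum < limit
  · rw [if_pos hsum, if_pos hsum]
  · rw [if_neg hsum, if_neg hsum]
    obtain ⟨hlen, hfit⟩ := hshape (by omega)
    dsimp only
    have hinv : PmInv materials (List.replicate materials.length 0) materials :=
      ⟨List.length_replicate, rfl, fun k => by rw [pm_getD_replicate]; ring⟩
    have hmain := pm_main materials limit cookbooks attribute_
      (List.replicate materials.length 0) materials 0 0 (-1) false hinv hfit hlen le_rfl
    rw [pm_stepfold materials cookbooks attribute_ limit _ (-1)]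
    have hmask : pmMasks false cookbooks.length = (List.range (2 ^ cookbooks.length)).drop 1 := by
      simp [pmMasks]
    rw [← hmask, hmain]
    have := pmDfs_ge_false limit (cookbooks.zip attribute_) materials 0 0
    omega
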